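-- pv_equiv track=rewrite | github.com/hirona98/cocoro_ghost | cocoro_ghost/reminders_logic.py | normalize_weekdays
-- ===== SOURCE A (Python) =====
-- WEEKDAYS_SUN_FIRST: list[str] = ["sun", "mon", "tue", "wed", "thu", "fri", "sat"]
--
-- _WEEKDAY_TO_BIT: dict[str, int] = {d: (1 << i) for i, d in enumerate(WEEKDAYS_SUN_FIRST)}
--
-- def normalize_weekdays(values: list[str]) -> list[str]:
--     """
--     weekdays を正規化する。
--
--     - 小文字化
--     - 重複排除
--     - Sun-first の順でソート
--     """
--
--     seen: set[str] = set()
--     normalized: list[str] = []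
--     for raw in list(values or []):
--         s = str(raw or "").strip().lower()
--         if not s:
--             continue
--         if s not in _WEEKDAY_TO_BIT:
--             raise ValueError(f"invalid weekday: {s} (expected one of {WEEKDAYS_SUN_FIRST})")
--         if s in seen:
--             continue
--         seen.add(s)
--         normalized.append(s)
--
--     # --- Sun-first に整列 ---
--     normalized.sort(key=lambda d: WEEKDAYS_SUN_FIRST.index(d))
--     return normalized
-- ===== SOURCE B (Python) =====
-- WEEKDAYS_SUN_FIRST: list[str] = ["sun", "mon", "tue", "wed", "thu", "fri", "sat"]
--
-- _WEEKDAY_TO_BIT: dict[str, int] = {d: (1 << i) for i, d in enumerate(WEEKDAYS_SUN_FIRST)}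
--
--
-- def normalize_weekdays(values: list[str]) -> list[str]:
--     # Pass 1: validate and collect the wanted days in a set.
--     wanted: set[str] = set()
--     for raw in list(values or []):
--         s = str(raw or "").strip().lower()
--         if not s:
--             continue
--         if s not in _WEEKDAY_TO_BIT:
--             raise ValueError(f"invalid weekday: {s} (expected one of {WEEKDAYS_SUN_FIRST})")
--         wanted.add(s)
--     # Pass 2: the canonical sun-first traversal yields the order and dedup for free.
--     return [d for d in WEEKDAYS_SUN_FIRST if d in wanted]
-- ===== Notes on version B (the rewrite author's own statement) =====
-- stated objective: simpler
-- what changed: A collects first occurrences into a list and then sorts it with key=WEEKDAYS_SUN_FIRST.index; B collects the valid days into a set and emits them by traversing the canonical sun-first list, so dedup and order come for free and the explicit sort disappears.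
import Mathlib
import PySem

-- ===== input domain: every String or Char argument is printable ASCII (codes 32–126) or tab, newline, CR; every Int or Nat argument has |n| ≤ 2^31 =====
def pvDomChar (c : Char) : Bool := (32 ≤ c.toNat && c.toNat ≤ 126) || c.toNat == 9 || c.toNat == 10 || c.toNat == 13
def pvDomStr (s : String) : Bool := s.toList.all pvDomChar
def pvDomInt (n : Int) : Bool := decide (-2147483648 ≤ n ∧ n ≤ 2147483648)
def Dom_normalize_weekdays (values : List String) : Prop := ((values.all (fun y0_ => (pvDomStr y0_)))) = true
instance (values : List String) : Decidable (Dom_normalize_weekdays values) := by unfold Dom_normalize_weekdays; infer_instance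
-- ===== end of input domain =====

-- B replaces A's collect-then-sort-by-index with a validate-into-a-set pass followed by a
-- traversal of the canonical sun-first list (objective: simpler; return-value equivalence,
-- both Pythons raise the same ValueError on the inputs Pre_ excludes).

-- ===== PORT A =====
def pvWEEKDAYS : List String := ["sun", "mon", "tue", "wed", "thu", "fri", "sat"]

-- _WEEKDAY_TO_BIT; '1 << i' ported as 2^i (exact, i ≥ 0)
def pvBIT : PySem.Dict String Int :=
  PySem.Dict.ofList ((PySem.List.enumerate pvWEEKDAYS).map (fun p => (p.2, (2 : Int) ^ p.1.toNat)))

-- 'str(raw or "")' is raw itself for a str argument (and "" when raw = ""), so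
-- s = str(raw or "").strip().lower() is exactly strip-then-lower of raw; 'list(values or [])'
-- is the list values itself.  'WEEKDAYS_SUN_FIRST.index(d)' always succeeds on the sorted
-- elements, ported as index?.getD 0.
def normalize_weekdays (values : List String) : List String :=
  let st := values.foldl (fun (st : PySem.Set String × List String) raw =>
      let s := PySem.Str.lower (PySem.Str.strip raw)
      if s = "" then st
      else if ¬ pvBIT.contains s then st   -- Python raises ValueError here; excluded by Pre_
      else if PySem.Set.contains st.1 s then st
      else (PySem.Set.add st.1 s, st.2 ++ [s]))
    (PySem.Set.empty, [])
  PySem.List.sorted st.2 (fun d => ((PySem.List.index? pvWEEKDAYS d).getD 0 : Nat))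

-- ===== PORT B =====
def normalize_weekdays_alt (values : List String) : List String :=
  let wanted := values.foldl (fun (w : PySem.Set String) raw =>
      let s := PySem.Str.lower (PySem.Str.strip raw)
      if s = "" then w
      else if ¬ pvBIT.contains s then w   -- Python raises ValueError here; excluded by Pre_
      else PySem.Set.add w s)
    PySem.Set.empty
  pvWEEKDAYS.filter (fun d => PySem.Set.contains wanted d)

-- ===== PRECONDITION & SPEC =====
-- Pre_ excludes exactly the inputs on which the Python A (and B alike) raises ValueError:
-- some value whose stripped-lowercased form is non-empty and not a weekday name.
def Pre_normalize_weekdays (values : List String) : Prop :=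
  ∀ v ∈ values, PySem.Str.lower (PySem.Str.strip v) = "" ∨
    PySem.Str.lower (PySem.Str.strip v) ∈ pvWEEKDAYS
instance (values : List String) : Decidable (Pre_normalize_weekdays values) := by
  unfold Pre_normalize_weekdays; infer_instance

def pvWitness_normalize_weekdays : List String := ["FRI", " sun ", "", "fri", "mon"]

def Spec_normalize_weekdays (values : List String) (out : List String) : Prop := out = normalize_weekdays_alt values
instance (values : List String) (out : List String) : Decidable (Spec_normalize_weekdays values out) := by unfold Spec_normalize_weekdays; infer_instance

-- ===== CLAIM (what is proved, stated in full; the proofs are below) =====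
def Claim_equal_normalize_weekdays : Prop := ∀ (values : List String), Dom_normalize_weekdays values → Pre_normalize_weekdays values → Spec_normalize_weekdays values (normalize_weekdays values)

-- ===== LEMMAS AND PROOFS =====

theorem pvBIT_keys : pvBIT.keys = pvWEEKDAYS := by decide

theorem contains_pvBIT (s : String) : pvBIT.contains s = true ↔ s ∈ pvWEEKDAYS := by
  rw [PySem.Dict.contains_iff_mem_keys, pvBIT_keys]

-- the combined loop invariant relating A's (seen, normalized) state to B's set 'wanted':
-- same membership, and A's list stays duplicate-free with weekday elements only
theorem fold_rel (vs : List String) :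
    ∀ (seen : PySem.Set String) (out : List String) (w : PySem.Set String),
    (∀ x, x ∈ seen ↔ x ∈ w) → (∀ x, x ∈ out ↔ x ∈ seen) → out.Nodup →
    (∀ x ∈ out, x ∈ pvWEEKDAYS) →
    (∀ x, x ∈ (vs.foldl (fun (st : PySem.Set String × List String) raw =>
      let s := PySem.Str.lower (PySem.Str.strip raw)
      if s = "" then st
      else if ¬ pvBIT.contains s then st
      else if PySem.Set.contains st.1 s then st
      else (PySem.Set.add st.1 s, st.2 ++ [s])) (seen, out)).2 ↔
        x ∈ vs.foldl (fun (w : PySem.Set String) raw =>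
      let s := PySem.Str.lower (PySem.Str.strip raw)
      if s = "" then w
      else if ¬ pvBIT.contains s then w
      else PySem.Set.add w s) w) ∧
    (vs.foldl (fun (st : PySem.Set String × List String) raw =>
      let s := PySem.Str.lower (PySem.Str.strip raw)
      if s = "" then st
      else if ¬ pvBIT.contains s then st
      else if PySem.Set.contains st.1 s then st
      else (PySem.Set.add st.1 s, st.2 ++ [s])) (seen, out)).2.Nodup ∧
    (∀ x ∈ (vs.foldl (fun (st : PySem.Set String × List String) raw =>
      let s := PySem.Str.lower (PySem.Str.strip raw)
      if s = "" then st
      else if ¬ pvBIT.contains s then st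
      else if PySem.Set.contains st.1 s then st
      else (PySem.Set.add st.1 s, st.2 ++ [s])) (seen, out)).2, x ∈ pvWEEKDAYS) := by
  induction vs with
  | nil =>
    intro seen out w h1 h2 h3 h4
    exact ⟨fun x => (h2 x).trans (h1 x), h3, h4⟩
  | cons v rest ih =>
    intro seen out w h1 h2 h3 h4
    simp only [List.foldl_cons]
    by_cases hse : PySem.Str.lower (PySem.Str.strip v) = ""
    · simp only [if_pos hse]
      exact ih seen out w h1 h2 h3 h4
    · by_cases hbit : pvBIT.contains (PySem.Str.lower (PySem.Str.strip v)) = true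
      · by_cases hseen : PySem.Set.contains seen (PySem.Str.lower (PySem.Str.strip v)) = true
        · have hsw : PySem.Str.lower (PySem.Str.strip v) ∈ w :=
            (h1 _).mp ((PySem.Set.contains_iff _ _).mp hseen)
          simp only [if_neg hse, hbit, hseen, not_true, if_false, ite_true]
          refine ih seen out (PySem.Set.add w _) (fun x => ?_) h2 h3 h4
          rw [PySem.Set.mem_add]
          exact (h1 x).trans ⟨Or.inl, fun h => h.elim id (fun he => he ▸ hsw)⟩
        · have hns : PySem.Str.lower (PySem.Str.strip v) ∉ seen := by
            intro h; exact hseen ((PySem.Set.contains_iff _ _).mpr h)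
          simp only [if_neg hse, hbit, hseen, not_true, if_false]
          refine ih _ _ _ (fun x => ?_) (fun x => ?_) ?_ ?_
          · rw [PySem.Set.mem_add, PySem.Set.mem_add]
            exact or_congr_left (h1 x)
          · rw [PySem.Set.mem_add, List.mem_append, List.mem_singleton]
            exact or_congr_left (h2 x)
          · refine List.nodup_append.mpr ⟨h3, List.nodup_singleton _, ?_⟩
            intro a ha b hb
            rw [List.mem_singleton] at hb
            subst hb
            exact fun he => hns (he ▸ (h2 a).mp ha)
          · intro x hx
            rcases List.mem_append.mp hx with h | h
            · exact h4 x h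
            · rw [List.mem_singleton] at h
              exact h ▸ (contains_pvBIT _).mp hbit
      · simp only [if_neg hse, if_pos hbit]
        exact ih seen out w h1 h2 h3 h4

-- sorting a duplicate-free list of weekday names by sun-first index IS the
-- sun-first traversal that keeps its members
theorem sorted_eq_filter (out : List String) (hnd : out.Nodup)
    (hw : ∀ x ∈ out, x ∈ pvWEEKDAYS) :
    PySem.List.sorted out (fun d => ((PySem.List.index? pvWEEKDAYS d).getD 0 : Nat)) =
    pvWEEKDAYS.filter (fun d => decide (d ∈ out)) := by
  apply PySem.List.sorted_eq_of_perm_of_pairwise_lt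
  · refine (List.perm_ext_iff_of_nodup ?_ hnd).mpr ?_
    · exact (by decide : pvWEEKDAYS.Nodup).filter _
    · intro a; simp only [List.mem_filter, decide_eq_true_eq]
      exact ⟨fun h => h.2, fun h => ⟨hw a h, h⟩⟩
  · exact List.Pairwise.sublist List.filter_sublist
      (by decide : pvWEEKDAYS.Pairwise
        (fun a b => ((PySem.List.index? pvWEEKDAYS a).getD 0 : Nat) < (PySem.List.index? pvWEEKDAYS b).getD 0))

-- ===== VERDICT (by name: the statement is the Claim_ definition above) =====
theorem normalize_weekdays_spec : Claim_equal_normalize_weekdays := by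
  intro values _ _
  show normalize_weekdays values = normalize_weekdays_alt values
  simp only [normalize_weekdays, normalize_weekdays_alt]
  obtain ⟨hmem, hnd, hw⟩ := fold_rel values PySem.Set.empty [] PySem.Set.empty
    (fun _ => Iff.rfl) (fun _ => Iff.rfl) List.nodup_nil (fun _ hx => absurd hx (List.not_mem_nil))
  rw [sorted_eq_filter _ hnd hw]
  refine List.filter_congr ?_
  intro d _
  rw [Bool.eq_iff_iff]
  constructor
  · intro h; exact (PySem.Set.contains_iff _ _).mpr ((hmem d).mp (of_decide_eq_true h))
  · intro h; exact decide_eq_true ((hmem d).mpr ((PySem.Set.contains_iff _ _).mp h))
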